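-- pv_equiv track=rewrite | github.com/Yijuwarp/CohortAnalysis | backend/app/main.py | suggest_user_id
-- ===== SOURCE A (Python) =====
-- def suggest_user_id(columns: list[str]) -> str | None:
--     for col in columns:
--         name = col.lower()
--
--         if name == "user_id":
--             return col
--         if name.endswith("_user_id"):
--             return col
--         if "user_id" in name:
--             return col
--         if "userid" in name:
--             return col
--         if name.endswith("_uid") or name == "uid":
--             return col
--         if "customer_id" in name:
--             return col
--
--     for col in columns:
--         if "user" in col.lower() and "type" not in col.lower() and "segment" not in col.lower():
--             return col
--
--     return None
-- ===== SOURCE B (Python) =====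
-- def suggest_user_id(columns: list[str]) -> str | None:
--     def priority(col):
--         name = col.lower()
--         if ("user_id" in name or "userid" in name or name.endswith("_uid")
--                 or name == "uid" or "customer_id" in name):
--             return 1
--         if "user" in name and "type" not in name and "segment" not in name:
--             return 2
--         return None
--
--     best = None  # (priority, column); first column at the best priority wins
--     for col in columns:
--         p = priority(col)
--         if p is not None and (best is None or p < best[0]):
--             best = (p, col)
--     return best[1] if best is not None else None
-- ===== Notes on version B (the rewrite author's own statement) =====
-- stated objective: alternative
-- what changed: Replaces A's two early-returning scans (primary heuristics, then fallback) by one pass that scores each column with a priority and keeps the first column at the strictly best priority.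
import Mathlib
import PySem

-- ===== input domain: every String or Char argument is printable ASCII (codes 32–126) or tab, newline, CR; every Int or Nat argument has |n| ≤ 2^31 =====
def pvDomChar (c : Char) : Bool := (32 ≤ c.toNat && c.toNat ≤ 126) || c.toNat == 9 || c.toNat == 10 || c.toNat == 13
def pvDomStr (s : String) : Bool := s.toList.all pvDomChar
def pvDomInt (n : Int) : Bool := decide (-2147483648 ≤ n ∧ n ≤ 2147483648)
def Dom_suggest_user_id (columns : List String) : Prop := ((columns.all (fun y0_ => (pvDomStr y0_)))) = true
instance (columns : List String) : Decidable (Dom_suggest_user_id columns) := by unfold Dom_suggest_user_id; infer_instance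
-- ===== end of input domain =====

-- B replaces A's two early-returning scans by one pass keeping the first column at the best priority (objective: alternative decomposition).

-- ===== PORT A =====
-- first loop of A: early-return on any of the six primary heuristics
def suggestLoop1 : List String → Option String
  | [] => none
  | col :: rest =>
    let name := PySem.Str.lower col
    if name == "user_id" then some col
    else if PySem.Str.endswith name "_user_id" then some col
    else if PySem.Str.isIn "user_id" name then some col
    else if PySem.Str.isIn "userid" name then some col
    else if PySem.Str.endswith name "_uid" || name == "uid" then some col
    else if PySem.Str.isIn "customer_id" name then some col
    else suggestLoop1 rest

-- second loop of A: the fallback predicate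
def suggestLoop2 : List String → Option String
  | [] => none
  | col :: rest =>
    if PySem.Str.isIn "user" (PySem.Str.lower col)
        && !PySem.Str.isIn "type" (PySem.Str.lower col)
        && !PySem.Str.isIn "segment" (PySem.Str.lower col) then some col
    else suggestLoop2 rest

def suggest_user_id (columns : List String) : Option String :=
  match suggestLoop1 columns with
  | some c => some c
  | none => suggestLoop2 columns

-- ===== PORT B =====
-- priority of one column: some 1 (primary heuristics), some 2 (fallback), none
def altPriority (col : String) : Option Nat :=
  let name := PySem.Str.lower col
  if PySem.Str.isIn "user_id" name || PySem.Str.isIn "userid" name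
      || PySem.Str.endswith name "_uid" || name == "uid"
      || PySem.Str.isIn "customer_id" name then some 1
  else if PySem.Str.isIn "user" name && !PySem.Str.isIn "type" name
      && !PySem.Str.isIn "segment" name then some 2
  else none

-- one step of B's loop: update best only on strictly better priority
def altStep (best : Option (Nat × String)) (col : String) : Option (Nat × String) :=
  match altPriority col with
  | none => best
  | some p =>
    match best with
    | none => some (p, col)
    | some (bp, _) => if p < bp then some (p, col) else best

def suggest_user_id_alt (columns : List String) : Option String :=
  (columns.foldl altStep none).map Prod.snd

-- ===== PRECONDITION & SPEC =====
def Spec_suggest_user_id (columns : List String) (out : Option String) : Prop := out = suggest_user_id_alt columns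
instance (columns : List String) (out : Option String) : Decidable (Spec_suggest_user_id columns out) := by unfold Spec_suggest_user_id; infer_instance

-- ===== CLAIM (what is proved, stated in full; the proofs are below) =====
def Claim_equal_suggest_user_id : Prop := ∀ (columns : List String), Dom_suggest_user_id columns → Spec_suggest_user_id columns (suggest_user_id columns)

-- ===== LEMMAS AND PROOFS =====

-- abbreviations for the two predicates, on the already-lowered name
def primCond (name : String) : Bool :=
  PySem.Str.isIn "user_id" name || PySem.Str.isIn "userid" name
    || PySem.Str.endswith name "_uid" || name == "uid"
    || PySem.Str.isIn "customer_id" name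

def fbCond (name : String) : Bool :=
  PySem.Str.isIn "user" name && !PySem.Str.isIn "type" name
    && !PySem.Str.isIn "segment" name

theorem altPriority_eq (col : String) :
    altPriority col =
      if primCond (PySem.Str.lower col) then some 1
      else if fbCond (PySem.Str.lower col) then some 2 else none := rfl

theorem endswith_userid_isIn {name : String} (h : PySem.Str.endswith name "_user_id" = true) :
    PySem.Str.isIn "user_id" name = true := by
  rw [PySem.Str.isIn_iff_infix]
  have hs : "_user_id".toList <:+ name.toList := by
    have := (PySem.Chars.endswith_iff (s := name.toList) (p := "_user_id".toList)).mp
    simpa [PySem.Str.endswith_eq] using this (by simpa [PySem.Str.endswith_eq] using h)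
  have h2 : "user_id".toList <:+ "_user_id".toList := by decide
  exact (h2.trans hs).isInfix

theorem suggestLoop1_step (col : String) (rest : List String) :
    suggestLoop1 (col :: rest) =
      if primCond (PySem.Str.lower col) then some col else suggestLoop1 rest := by
  by_cases hp : primCond (PySem.Str.lower col) = true
  · rw [if_pos hp]
    unfold suggestLoop1
    dsimp only
    split_ifs with h1 h2 h3 h4 h5 h6 <;> try rfl
    exfalso
    simp only [primCond, Bool.or_eq_true] at hp
    rcases hp with ((((h | h) | h) | h) | h)
    · exact h3 h
    · exact h4 h
    · exact h5 (by simp only [h, Bool.true_or])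
    · exact h5 (by simp only [h, Bool.or_true])
    · exact h6 h
  · rw [if_neg hp]
    unfold suggestLoop1
    dsimp only
    split_ifs with h1 h2 h3 h4 h5 h6 <;> try rfl
    · exact absurd (by rw [show PySem.Str.lower col = "user_id" from by simpa using h1]; decide) hp
    · exact absurd (by
        simp only [primCond, Bool.or_eq_true]
        exact Or.inl (Or.inl (Or.inl (Or.inl (endswith_userid_isIn h2))))) hp
    · exact absurd (by
        simp only [primCond, Bool.or_eq_true]
        exact Or.inl (Or.inl (Or.inl (Or.inl h3)))) hp
    · exact absurd (by
        simp only [primCond, Bool.or_eq_true]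
        exact Or.inl (Or.inl (Or.inl (Or.inr h4)))) hp
    · simp only [Bool.or_eq_true] at h5
      rcases h5 with h5 | h5
      · exact absurd (by
          simp only [primCond, Bool.or_eq_true]
          exact Or.inl (Or.inl (Or.inr h5))) hp
      · exact absurd (by
          simp only [primCond, Bool.or_eq_true]
          exact Or.inl (Or.inr h5)) hp
    · exact absurd (by
        simp only [primCond, Bool.or_eq_true]
        exact Or.inr h6) hp
    · conv_lhs => unfold suggestLoop1

theorem suggestLoop1_eq_find (cs : List String) :
    suggestLoop1 cs = cs.find? (fun col => primCond (PySem.Str.lower col)) := by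
  induction cs with
  | nil => rfl
  | cons col rest ih =>
    rw [suggestLoop1_step]
    by_cases hp : primCond (PySem.Str.lower col) = true
    · rw [if_pos hp,
        List.find?_cons_of_pos (p := fun col => primCond (PySem.Str.lower col)) hp]
    · have hp' : primCond (PySem.Str.lower col) = false := by rwa [Bool.not_eq_true] at hp
      rw [if_neg hp,
        List.find?_cons_of_neg (p := fun col => primCond (PySem.Str.lower col)) hp, ih]

theorem suggestLoop2_eq_find (cs : List String) :
    suggestLoop2 cs = cs.find? (fun col => fbCond (PySem.Str.lower col)) := by
  induction cs with
  | nil => rfl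
  | cons col rest ih =>
    by_cases hf : fbCond (PySem.Str.lower col) = true
    · rw [List.find?_cons_of_pos (p := fun col => fbCond (PySem.Str.lower col)) hf]
      unfold suggestLoop2
      rw [if_pos (by simpa [fbCond] using hf)]
    · rw [List.find?_cons_of_neg (p := fun col => fbCond (PySem.Str.lower col)) hf]
      unfold suggestLoop2
      rw [if_neg (by simpa [fbCond] using hf), ih]

-- once best has priority 1, the fold never changes it
theorem fold_one (cs : List String) (c : String) :
    cs.foldl altStep (some (1, c)) = some (1, c) := by
  induction cs with
  | nil => rfl
  | cons col rest ih =>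
    have : altStep (some (1, c)) col = some (1, c) := by
      unfold altStep
      cases h : altPriority col with
      | none => rfl
      | some p =>
        have hp : p = 1 ∨ p = 2 := by
          rw [altPriority_eq] at h
          split_ifs at h <;> simp_all
        rcases hp with hp | hp <;> simp [hp]
    simpa [List.foldl_cons, this] using ih

-- with best at priority 2, the fold only looks for a primary column
theorem fold_two (cs : List String) (c : String) :
    cs.foldl altStep (some (2, c)) =
      match cs.find? (fun col => primCond (PySem.Str.lower col)) with
      | some c' => some (1, c')
      | none => some (2, c) := by
  induction cs generalizing c with
  | nil => rfl
  | cons col rest ih =>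
    rw [List.foldl_cons, List.find?_cons]
    by_cases hp : primCond (PySem.Str.lower col) = true
    · have : altStep (some (2, c)) col = some (1, col) := by
        unfold altStep; rw [altPriority_eq]; simp [hp]
      simp [hp, this, fold_one]
    · have : altStep (some (2, c)) col = some (2, c) := by
        unfold altStep; rw [altPriority_eq]
        simp [hp]
        split_ifs <;> rfl
      simp [hp, this, ih]

-- full characterisation of B's fold from the empty state
theorem fold_none (cs : List String) :
    cs.foldl altStep none =
      match cs.find? (fun col => primCond (PySem.Str.lower col)) with
      | some c => some (1, c)
      | none =>
        match cs.find? (fun col => fbCond (PySem.Str.lower col)) with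
        | some c => some (2, c)
        | none => none := by
  induction cs with
  | nil => rfl
  | cons col rest ih =>
    rw [List.foldl_cons, List.find?_cons, List.find?_cons]
    by_cases hp : primCond (PySem.Str.lower col) = true
    · have : altStep none col = some (1, col) := by
        unfold altStep; rw [altPriority_eq]; simp [hp]
      simp [hp, this, fold_one]
    · by_cases hf : fbCond (PySem.Str.lower col) = true
      · have : altStep none col = some (2, col) := by
          unfold altStep; rw [altPriority_eq]; simp [hp, hf]
        simp [hp, hf, this, fold_two]
      · have : altStep none col = none := by
          unfold altStep; rw [altPriority_eq]; simp [hp, hf]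
        simp [hp, hf, this, ih]

-- ===== VERDICT (by name: the statement is the Claim_ definition above) =====
theorem suggest_user_id_spec : Claim_equal_suggest_user_id := by
  intro columns _
  unfold Spec_suggest_user_id suggest_user_id suggest_user_id_alt
  rw [fold_none, suggestLoop1_eq_find, suggestLoop2_eq_find]
  cases columns.find? (fun col => primCond (PySem.Str.lower col)) with
  | some c => rfl
  | none =>
    cases columns.find? (fun col => fbCond (PySem.Str.lower col)) <;> rfl
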